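-- pv_equiv track=rewrite | github.com/daniela440/austin-construction-contracts | osha_enrich.py | pick_best_person
-- ===== SOURCE A (Python) =====
-- PREFERRED_TITLES = [
--     "Safety Manager", "Safety Director", "HSE Manager", "EHS Manager",
--     "Director of Safety", "VP of Safety", "Health and Safety",
--     "Environmental Health and Safety", "Safety Coordinator",
--     "Safety Officer", "Safety Specialist", "Safety Superintendent",
--     "Risk Manager", "Loss Prevention",
--     "Project Manager", "Construction Manager", "Operations Manager",
--     "Superintendent", "General Manager",
--     "Vice President", "President", "CEO", "Owner",
-- ]
--
-- def pick_best_person(people):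
--     if not people:
--         return None
--     scored = []
--     for p in people:
--         title = (p.get("title") or "").lower()
--         if not title:
--             continue
--         best_score = len(PREFERRED_TITLES) + 1
--         for i, pref in enumerate(PREFERRED_TITLES):
--             if pref.lower() in title:
--                 best_score = i
--                 break
--         scored.append((best_score, p))
--     if not scored:
--         for p in people:
--             if p.get("title"):
--                 return p
--         return people[0] if people else None
--     scored.sort(key=lambda x: x[0])
--     return scored[0][1]
-- ===== SOURCE B (Python) =====
-- PREFERRED_TITLES = [
--     "Safety Manager", "Safety Director", "HSE Manager", "EHS Manager",
--     "Director of Safety", "VP of Safety", "Health and Safety",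
--     "Environmental Health and Safety", "Safety Coordinator",
--     "Safety Officer", "Safety Specialist", "Safety Superintendent",
--     "Risk Manager", "Loss Prevention",
--     "Project Manager", "Construction Manager", "Operations Manager",
--     "Superintendent", "General Manager",
--     "Vice President", "President", "CEO", "Owner",
-- ]
--
-- def pick_best_person(people):
--     if not people:
--         return None
--     # highest-priority preferred title first; within a priority, original order
--     for pref in PREFERRED_TITLES:
--         pl = pref.lower()
--         for p in people:
--             if pl in (p.get("title") or "").lower():
--                 return p
--     # nobody matches any preferred title: first person with a title, else first person
--     for p in people:
--         if p.get("title"):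
--             return p
--     return people[0]
-- ===== Notes on version B (the rewrite author's own statement) =====
-- stated objective: simpler
-- what changed: B drops A's scored-list build and stable sort entirely: it scans PREFERRED_TITLES in priority order and returns the first person (in original order) whose lowercased title contains that preferred title, falling back to the first titled person and then to people[0].
import Mathlib
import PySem

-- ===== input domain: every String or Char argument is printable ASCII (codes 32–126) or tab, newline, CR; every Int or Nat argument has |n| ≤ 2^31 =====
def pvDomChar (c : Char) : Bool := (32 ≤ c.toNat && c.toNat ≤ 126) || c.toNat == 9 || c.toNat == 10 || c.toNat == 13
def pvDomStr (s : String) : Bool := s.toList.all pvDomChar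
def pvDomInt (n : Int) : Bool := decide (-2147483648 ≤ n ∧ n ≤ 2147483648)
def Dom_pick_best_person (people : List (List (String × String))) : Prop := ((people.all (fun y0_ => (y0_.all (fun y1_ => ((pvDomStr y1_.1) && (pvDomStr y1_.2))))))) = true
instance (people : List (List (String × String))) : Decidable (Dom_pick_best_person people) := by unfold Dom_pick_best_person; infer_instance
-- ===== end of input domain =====

-- B replaces A's score-every-person-then-stable-sort pipeline with a direct priority scan over
-- PREFERRED_TITLES (objective: simpler).

-- shared module constant PREFERRED_TITLES
def pvPrefs : List String := [
  "Safety Manager", "Safety Director", "HSE Manager", "EHS Manager",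
  "Director of Safety", "VP of Safety", "Health and Safety",
  "Environmental Health and Safety", "Safety Coordinator",
  "Safety Officer", "Safety Specialist", "Safety Superintendent",
  "Risk Manager", "Loss Prevention",
  "Project Manager", "Construction Manager", "Operations Manager",
  "Superintendent", "General Manager",
  "Vice President", "President", "CEO", "Owner"]

-- (p.get("title") or "").lower()  — used verbatim by both Pythons
def pvTitle (p : List (String × String)) : String :=
  PySem.Str.lower (((PySem.Dict.mk p).get? "title").getD "")

-- ===== PORT A =====
-- 'for i, pref in enumerate(PREFERRED_TITLES): if pref.lower() in title: best_score = i; break'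
def pvScoreLoop (eprefs : List (Int × String)) (title : String) (dflt : Int) : Int :=
  match eprefs with
  | [] => dflt
  | (i, pref) :: rest =>
    if PySem.Str.isIn (PySem.Str.lower pref) title then i else pvScoreLoop rest title dflt

-- 'for p in people: if p.get("title"): return p'
def pvLoopTitled (people : List (List (String × String))) : Option (List (String × String)) :=
  match people with
  | [] => none
  | p :: rest =>
    if ((PySem.Dict.mk p).get? "title").getD "" ≠ "" then some p else pvLoopTitled rest

def pick_best_person (people : List (List (String × String))) : Option (List (String × String)) :=
  match people with
  | [] => none
  | _ :: _ =>
    let scored := people.foldl (fun acc p =>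
      let title := pvTitle p
      if title = "" then acc
      else acc ++ [(pvScoreLoop (PySem.List.enumerate pvPrefs 0) title ((pvPrefs.length : Int) + 1), p)]) []
    match scored with
    | [] =>
      match pvLoopTitled people with
      | some p => some p
      | none => people.head?      -- 'people[0] if people else None'
    | _ :: _ =>
      match PySem.List.sorted scored (fun x => x.1) false with
      | [] => none                 -- unreachable: sorted of a nonempty list
      | (_, p) :: _ => some p      -- 'return scored[0][1]'

-- ===== PORT B =====
-- outer loop of B: for each preferred title in order, first person whose title contains it
def pvScanPrefs (people : List (List (String × String))) : List String → Option (List (String × String))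
  | [] => none
  | pref :: rest =>
    match people.find? (fun p => PySem.Str.isIn (PySem.Str.lower pref) (pvTitle p)) with
    | some p => some p
    | none => pvScanPrefs people rest

def pick_best_person_alt (people : List (List (String × String))) : Option (List (String × String)) :=
  match people with
  | [] => none
  | _ :: _ =>
    match pvScanPrefs people pvPrefs with
    | some p => some p
    | none =>
      match people.find? (fun p => decide (((PySem.Dict.mk p).get? "title").getD "" ≠ "")) with
      | some p => some p
      | none => people.head?      -- 'return people[0]'

-- ===== PRECONDITION & SPEC =====
def Spec_pick_best_person (people : List (List (String × String))) (out : Option (List (String × String))) : Prop := out = pick_best_person_alt people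
instance (people : List (List (String × String))) (out : Option (List (String × String))) : Decidable (Spec_pick_best_person people out) := by unfold Spec_pick_best_person; infer_instance

-- ===== CLAIM (what is proved, stated in full; the proofs are below) =====
def Claim_equal_pick_best_person : Prop := ∀ (people : List (List (String × String))), Dom_pick_best_person people → Spec_pick_best_person people (pick_best_person people)

-- ===== LEMMAS AND PROOFS =====

-- 'lower' of an ASCII-or-not string is empty iff the string is empty
lemma pvLower_eq_empty (s : String) : PySem.Str.lower s = "" ↔ s = "" := by
  constructor
  · intro h
    have h2 := congrArg String.toList h
    rw [PySem.Str.toList_lower] at h2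
    simp only [PySem.Chars.lower] at h2
    simpa using h2
  · intro h; subst h; rfl

-- with a nonempty needle, 'sub in ""' is false
lemma pvIsIn_empty {pref : String} (h : pref ≠ "") :
    PySem.Str.isIn (PySem.Str.lower pref) "" = false := by
  by_cases hb : PySem.Str.isIn (PySem.Str.lower pref) "" = true
  · exfalso
    rw [PySem.Str.isIn_iff_infix] at hb
    have h2 : (PySem.Str.lower pref).toList = [] := by simpa using hb
    exact h ((pvLower_eq_empty pref).mp (String.toList_eq_nil_iff.mp h2))
  · simpa using hb

-- the running strict minimum of A's sort-then-take-head, made explicit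
def pvFM {α : Type} (key : α → Int) (m : α) (xs : List α) : α :=
  xs.foldl (fun m x => if key x < key m then x else m) m

def pvFirstA {P : Type} (l : List (Int × P)) : Option P :=
  match l with
  | [] => none
  | z :: zs => some (pvFM (fun x => x.1) z zs).2

-- A's scored list, as a filterMap, generalized over the preference list and start index
def pvScoredF (prefs : List String) (k d : Int) (people : List (List (String × String))) :
    List (Int × List (String × String)) :=
  people.filterMap (fun p =>
    if pvTitle p = "" then none
    else some (pvScoreLoop (PySem.List.enumerate prefs k) (pvTitle p) d, p))

lemma pvScoreLoop_nil (k d : Int) (t : String) :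
    pvScoreLoop (PySem.List.enumerate ([] : List String) k) t d = d := by
  rw [PySem.List.enumerate_nil]; rfl

lemma pvScoreLoop_cons (pref : String) (rest : List String) (k d : Int) (t : String) :
    pvScoreLoop (PySem.List.enumerate (pref :: rest) k) t d
      = if PySem.Str.isIn (PySem.Str.lower pref) t then k
        else pvScoreLoop (PySem.List.enumerate rest (k + 1)) t d := by
  rw [PySem.List.enumerate_cons]; rfl

lemma pvScore_d_le : ∀ (prefs : List String) (k d : Int) (t : String), d ≤ k →
    d ≤ pvScoreLoop (PySem.List.enumerate prefs k) t d := by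
  intro prefs
  induction prefs with
  | nil => intro k d t h; rw [pvScoreLoop_nil]
  | cons pref rest ih =>
    intro k d t h
    rw [pvScoreLoop_cons]
    split_ifs with hm
    · exact h
    · exact ih (k + 1) d t (by omega)

lemma pvScore_lb : ∀ (prefs : List String) (k d : Int) (t : String), k ≤ d →
    k ≤ pvScoreLoop (PySem.List.enumerate prefs k) t d := by
  intro prefs
  induction prefs with
  | nil => intro k d t h; rw [pvScoreLoop_nil]; exact h
  | cons pref rest ih =>
    intro k d t h
    rw [pvScoreLoop_cons]
    split_ifs with hm
    · omega
    · by_cases h1 : k + 1 ≤ d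
      · have := ih (k + 1) d t h1; omega
      · have hdk : d ≤ k + 1 := by omega
        have := pvScore_d_le rest (k + 1) d t hdk
        omega

lemma pvFM_const {α : Type} (key : α → Int) (m : α) :
    ∀ xs : List α, (∀ x ∈ xs, ¬ key x < key m) → pvFM key m xs = m := by
  intro xs
  induction xs with
  | nil => intro _; rfl
  | cons y ys ih =>
    intro h
    simp only [pvFM, List.foldl_cons]
    rw [if_neg (h y (by simp))]
    exact ih (fun x hx => h x (List.mem_cons_of_mem _ hx))

lemma pvFM_find {α : Type} (key : α → Int) (c : Int) :
    ∀ (xs : List α) (m : α), (∀ x ∈ xs, c ≤ key x) → c < key m → (∃ x ∈ xs, key x = c) →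
    xs.find? (fun x => decide (key x = c)) = some (pvFM key m xs) := by
  intro xs
  induction xs with
  | nil => intro m _ _ hex; simp at hex
  | cons y ys ih =>
    intro m hall hm hex
    by_cases hy : key y = c
    · rw [List.find?_cons_of_pos (by simpa using hy)]
      have hfm : pvFM key m (y :: ys) = y := by
        simp only [pvFM, List.foldl_cons]
        rw [if_pos (by omega : key y < key m)]
        exact pvFM_const key y ys (fun x hx => by
          have := hall x (List.mem_cons_of_mem _ hx); omega)
      rw [hfm]
    · rw [List.find?_cons_of_neg (by simpa using hy)]
      have hy' : c < key y :=
        lt_of_le_of_ne (hall y (by simp)) (fun e => hy e.symm)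
      simp only [pvFM, List.foldl_cons]
      have hex' : ∃ x ∈ ys, key x = c := by
        rcases hex with ⟨x, hx, hxc⟩
        rcases List.mem_cons.mp hx with rfl | hx'
        · exact absurd hxc hy
        · exact ⟨x, hx', hxc⟩
      by_cases hh : key y < key m
      · rw [if_pos hh]
        exact ih y (fun x hx => hall x (List.mem_cons_of_mem _ hx)) hy' hex'
      · rw [if_neg hh]
        exact ih m (fun x hx => hall x (List.mem_cons_of_mem _ hx)) hm hex'

lemma pvFM_head {α : Type} (key : α → Int) (c : Int) (z : α) (zs : List α)
    (hall : ∀ x ∈ z :: zs, c ≤ key x) (hex : ∃ x ∈ z :: zs, key x = c) :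
    (z :: zs).find? (fun x => decide (key x = c)) = some (pvFM key z zs) := by
  by_cases hz : key z = c
  · rw [List.find?_cons_of_pos (by simpa using hz)]
    have : pvFM key z zs = z :=
      pvFM_const key z zs (fun x hx => by
        have := hall x (List.mem_cons_of_mem _ hx); omega)
    rw [this]
  · rw [List.find?_cons_of_neg (by simpa using hz)]
    have hz' : c < key z := lt_of_le_of_ne (hall z (by simp)) (fun e => hz e.symm)
    have hex' : ∃ x ∈ zs, key x = c := by
      rcases hex with ⟨x, hx, hxc⟩
      rcases List.mem_cons.mp hx with rfl | hx'
      · exact absurd hxc hz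
      · exact ⟨x, hx', hxc⟩
    exact pvFM_find key c zs z (fun x hx => hall x (List.mem_cons_of_mem _ hx)) hz' hex'

lemma pvHead_foldl_insertBy {α : Type} (key : α → Int) :
    ∀ (xs : List α) (m : α) (t : List α),
    ∃ t', xs.foldl (fun acc x => PySem.List.insertBy (fun a b => decide (key a < key b)) x acc) (m :: t)
            = pvFM key m xs :: t' := by
  intro xs
  induction xs with
  | nil => intro m t; exact ⟨t, rfl⟩
  | cons x xs ih =>
    intro m t
    rw [List.foldl_cons]
    have hins : PySem.List.insertBy (fun a b => decide (key a < key b)) x (m :: t)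
        = if key x < key m then x :: m :: t
          else m :: PySem.List.insertBy (fun a b => decide (key a < key b)) x t := by
      simp [PySem.List.insertBy]
    have hfm : pvFM key m (x :: xs) = pvFM key (if key x < key m then x else m) xs := by
      simp only [pvFM, List.foldl_cons]
    rw [hins, hfm]
    split_ifs with hc
    · exact ih x (m :: t)
    · exact ih m _

lemma pvSorted_head {α : Type} (key : α → Int) (z : α) (zs : List α) :
    ∃ t', PySem.List.sorted (z :: zs) key false = pvFM key z zs :: t' := by
  rw [PySem.List.sorted_eq_foldl_insertBy]
  rw [List.foldl_cons]
  have h1 : PySem.List.insertBy (fun a b => decide (key a < key b)) z [] = [z] := by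
    simp [PySem.List.insertBy]
  rw [h1]
  exact pvHead_foldl_insertBy key zs z []

lemma pvFirstA_min {P : Type} (l : List (Int × P)) (c : Int)
    (hall : ∀ x ∈ l, c ≤ x.1) (hex : ∃ x ∈ l, x.1 = c) :
    pvFirstA l = (l.find? (fun x => decide (x.1 = c))).map (·.2) := by
  cases l with
  | nil => simp at hex
  | cons z zs =>
    rw [pvFM_head (fun x => x.1) c z zs hall hex]
    rfl

lemma pvScored_ge (prefs : List String) (k d : Int) (people : List (List (String × String)))
    (hkd : k ≤ d) : ∀ x ∈ pvScoredF prefs k d people, k ≤ x.1 := by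
  intro x hx
  simp only [pvScoredF, List.mem_filterMap] at hx
  obtain ⟨p, hp, hfp⟩ := hx
  by_cases ht : pvTitle p = ""
  · rw [if_pos ht] at hfp; cases hfp
  · rw [if_neg ht] at hfp
    injection hfp with h
    subst h
    exact pvScore_lb prefs k d _ hkd

lemma pvFind_scored_cons (pref : String) (rest : List String) (k d : Int)
    (hpref : pref ≠ "") (hkd : k + 1 ≤ d) :
    ∀ people : List (List (String × String)),
    (pvScoredF (pref :: rest) k d people).find? (fun x => decide (x.1 = k))
      = (people.find? (fun p => PySem.Str.isIn (PySem.Str.lower pref) (pvTitle p))).map (fun p => (k, p)) := by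
  intro people
  induction people with
  | nil => rfl
  | cons q ps ih =>
    simp only [pvScoredF, List.filterMap_cons]
    by_cases ht : pvTitle q = ""
    · rw [if_pos ht]
      have hq : ¬ (PySem.Str.isIn (PySem.Str.lower pref) (pvTitle q) = true) := by
        rw [ht, pvIsIn_empty hpref]; exact Bool.false_ne_true
      rw [List.find?_cons_of_neg
        (p := fun p => PySem.Str.isIn (PySem.Str.lower pref) (pvTitle p)) (a := q) hq]
      exact ih
    · rw [if_neg ht]
      by_cases hm : PySem.Str.isIn (PySem.Str.lower pref) (pvTitle q) = true
      · rw [pvScoreLoop_cons, if_pos hm]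
        rw [List.find?_cons_of_pos (by simp)]
        rw [List.find?_cons_of_pos
          (p := fun p => PySem.Str.isIn (PySem.Str.lower pref) (pvTitle p)) (a := q) hm]
        rfl
      · have hsc : pvScoreLoop (PySem.List.enumerate (pref :: rest) k) (pvTitle q) d
            = pvScoreLoop (PySem.List.enumerate rest (k + 1)) (pvTitle q) d := by
          rw [pvScoreLoop_cons, if_neg hm]
        have hge := pvScore_lb rest (k + 1) d (pvTitle q) hkd
        rw [hsc]
        rw [List.find?_cons_of_neg (by simp; omega)]
        rw [List.find?_cons_of_neg
          (p := fun p => PySem.Str.isIn (PySem.Str.lower pref) (pvTitle p)) (a := q) hm]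
        exact ih

lemma pvFind_scored_nil (k d : Int) :
    ∀ people : List (List (String × String)),
    (pvScoredF ([] : List String) k d people).find? (fun x => decide (x.1 = d))
      = (people.find? (fun p => decide (pvTitle p ≠ ""))).map (fun p => (d, p)) := by
  intro people
  induction people with
  | nil => rfl
  | cons q ps ih =>
    simp only [pvScoredF, List.filterMap_cons]
    by_cases ht : pvTitle q = ""
    · rw [if_pos ht]
      rw [List.find?_cons_of_neg (by simp [ht])]
      exact ih
    · rw [if_neg ht, pvScoreLoop_nil]
      rw [List.find?_cons_of_pos (by simp)]
      rw [List.find?_cons_of_pos (by simpa using ht)]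
      rfl

lemma pvMain : ∀ (prefs : List String), (∀ s ∈ prefs, s ≠ "") → ∀ (k d : Int),
    k + prefs.length ≤ d → ∀ people : List (List (String × String)),
    pvFirstA (pvScoredF prefs k d people)
      = (match pvScanPrefs people prefs with
         | some p => some p
         | none => people.find? (fun p => decide (pvTitle p ≠ ""))) := by
  intro prefs
  induction prefs with
  | nil =>
    intro _ k d hd people
    simp only [pvScanPrefs]
    cases hfind : people.find? (fun p => decide (pvTitle p ≠ "")) with
    | none =>
      have hnil : pvScoredF ([] : List String) k d people = [] := by
        simp only [pvScoredF]
        rw [List.filterMap_eq_nil_iff]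
        intro p hp
        have hfp := List.find?_eq_none.mp hfind p hp
        simp only [decide_eq_true_eq, not_not] at hfp
        rw [if_pos hfp]
      rw [hnil]
      rfl
    | some p0 =>
      have hp0mem := List.mem_of_find?_eq_some hfind
      have hp0t : pvTitle p0 ≠ "" := by
        have := List.find?_some hfind; simpa using this
      have hall : ∀ x ∈ pvScoredF ([] : List String) k d people, d ≤ x.1 := by
        intro x hx
        simp only [pvScoredF, List.mem_filterMap] at hx
        obtain ⟨p, hp, hfp⟩ := hx
        by_cases ht : pvTitle p = ""
        · rw [if_pos ht] at hfp; cases hfp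
        · rw [if_neg ht, pvScoreLoop_nil] at hfp
          injection hfp with h; subst h; exact le_refl d
      have hex : ∃ x ∈ pvScoredF ([] : List String) k d people, x.1 = d := by
        refine ⟨(d, p0), ?_, rfl⟩
        simp only [pvScoredF, List.mem_filterMap]
        exact ⟨p0, hp0mem, by rw [if_neg hp0t, pvScoreLoop_nil]⟩
      rw [pvFirstA_min _ d hall hex, pvFind_scored_nil k d people, hfind]
      rfl
  | cons pref rest ih =>
    intro hne k d hd people
    have hpref : pref ≠ "" := hne pref (by simp)
    have hkd1 : (k : Int) + 1 ≤ d := by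
      simp only [List.length_cons] at hd; push_cast at hd; omega
    simp only [pvScanPrefs]
    cases hfind : people.find? (fun p => PySem.Str.isIn (PySem.Str.lower pref) (pvTitle p)) with
    | some p0 =>
      have hp0mem := List.mem_of_find?_eq_some hfind
      have hp0match : PySem.Str.isIn (PySem.Str.lower pref) (pvTitle p0) = true :=
        List.find?_some
          (p := fun p => PySem.Str.isIn (PySem.Str.lower pref) (pvTitle p)) hfind
      have ht0 : pvTitle p0 ≠ "" := by
        intro h; rw [h, pvIsIn_empty hpref] at hp0match; cases hp0match
      have hall : ∀ x ∈ pvScoredF (pref :: rest) k d people, k ≤ x.1 :=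
        pvScored_ge _ k d people (by omega)
      have hex : ∃ x ∈ pvScoredF (pref :: rest) k d people, x.1 = k := by
        refine ⟨(k, p0), ?_, rfl⟩
        simp only [pvScoredF, List.mem_filterMap]
        exact ⟨p0, hp0mem, by rw [if_neg ht0, pvScoreLoop_cons, if_pos hp0match]⟩
      rw [pvFirstA_min _ k hall hex,
          pvFind_scored_cons pref rest k d hpref hkd1 people, hfind]
      rfl
    | none =>
      have hskip : pvScoredF (pref :: rest) k d people = pvScoredF rest (k + 1) d people := by
        simp only [pvScoredF]
        apply List.filterMap_congr
        intro p hp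
        by_cases ht : pvTitle p = ""
        · rw [if_pos ht, if_pos ht]
        · have hnm := List.find?_eq_none.mp hfind p hp
          rw [if_neg ht, if_neg ht, pvScoreLoop_cons, if_neg (by simpa using hnm)]
      rw [hskip]
      have hd' : (k + 1) + (rest.length : Int) ≤ d := by
        simp only [List.length_cons] at hd; push_cast at hd ⊢; omega
      exact ih (fun s hs => hne s (List.mem_cons_of_mem _ hs)) (k + 1) d hd' people

lemma pvFoldlA_eq (people : List (List (String × String))) :
    ∀ acc, people.foldl (fun acc p =>
      let title := pvTitle p
      if title = "" then acc
      else acc ++ [(pvScoreLoop (PySem.List.enumerate pvPrefs 0) title ((pvPrefs.length : Int) + 1), p)]) acc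
      = acc ++ pvScoredF pvPrefs 0 ((pvPrefs.length : Int) + 1) people := by
  induction people with
  | nil => intro acc; simp [pvScoredF]
  | cons p ps ih =>
    intro acc
    rw [List.foldl_cons]
    simp only []
    by_cases ht : pvTitle p = ""
    · rw [if_pos ht, ih acc]
      simp only [pvScoredF, List.filterMap_cons]
      rw [if_pos ht]
    · rw [if_neg ht, ih _]
      simp only [pvScoredF, List.filterMap_cons]
      rw [if_neg ht, List.append_assoc]
      rfl

lemma pvLoopTitled_eq (people : List (List (String × String))) :
    pvLoopTitled people = people.find? (fun p => decide (pvTitle p ≠ "")) := by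
  induction people with
  | nil => rfl
  | cons q ps ih =>
    simp only [pvLoopTitled]
    by_cases h : ((PySem.Dict.mk q).get? "title").getD "" = ""
    · rw [if_neg (not_not_intro h)]
      have ht : pvTitle q = "" := by
        simp only [pvTitle, h]; rfl
      rw [List.find?_cons_of_neg (by simp [ht])]
      exact ih
    · rw [if_pos h]
      have ht : pvTitle q ≠ "" := fun e => h ((pvLower_eq_empty _).mp e)
      rw [List.find?_cons_of_pos (by simpa using ht)]

lemma pvFindTitled_eq (people : List (List (String × String))) :
    people.find? (fun p => decide (((PySem.Dict.mk p).get? "title").getD "" ≠ ""))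
      = people.find? (fun p => decide (pvTitle p ≠ "")) := by
  have hfun : (fun p : List (String × String) =>
      decide (((PySem.Dict.mk p).get? "title").getD "" ≠ ""))
      = (fun p => decide (pvTitle p ≠ "")) := by
    funext p
    rw [decide_eq_decide]
    exact not_congr (pvLower_eq_empty _).symm
  rw [hfun]

-- ===== VERDICT (by name: the statement is the Claim_ definition above) =====
theorem pick_best_person_spec : Claim_equal_pick_best_person := by
  intro people _
  show pick_best_person people = pick_best_person_alt people
  cases people with
  | nil => rfl
  | cons q ps =>
    simp only [pick_best_person, pick_best_person_alt]
    rw [pvFoldlA_eq (q :: ps) [], List.nil_append, pvFindTitled_eq, pvLoopTitled_eq]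
    have hmain := pvMain pvPrefs (by decide) 0 ((pvPrefs.length : Int) + 1)
      (by omega) (q :: ps)
    cases hsc : pvScoredF pvPrefs 0 ((pvPrefs.length : Int) + 1) (q :: ps) with
    | nil =>
      rw [hsc] at hmain
      cases hscan : pvScanPrefs (q :: ps) pvPrefs with
      | some p => rw [hscan] at hmain; simp [pvFirstA] at hmain
      | none => rfl
    | cons z zs =>
      obtain ⟨t', hsort⟩ := pvSorted_head (fun x => x.1) z zs
      rw [hsort]
      rw [hsc] at hmain
      simp only [pvFirstA] at hmain
      cases hscan : pvScanPrefs (q :: ps) pvPrefs with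
      | some p =>
        rw [hscan] at hmain
        exact hmain
      | none =>
        rw [hscan] at hmain
        cases hfind : (q :: ps).find? (fun p => decide (pvTitle p ≠ "")) with
        | some p => rw [hfind] at hmain; exact hmain
        | none => rw [hfind] at hmain; simp at hmain
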